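-- pv_equiv track=rewrite | github.com/rbp/advent-of-code-2024 | day10/trails.py | traverse_trails
-- ===== SOURCE A (Python) =====
-- from functools import reduce
--
-- def traverse_trails(map, i, j):
--     current = map[i][j]
--     if current == "9":
--         return [(i, j)]
--
--     return reduce(
--         lambda l1, l2: l1 + l2,
--         [traverse_trails(map, next_i, next_j)
--             for next_i, next_j in neighbours(map, str(int(current)+1), i, j)
--         ],
--         [])
--
-- def neighbours(map, value, i, j):
--     return [
--         (next_i, next_j)
--         for next_i, next_j in [
--             (i-1, j),
--             (i, j+1),
--             (i+1, j),
--             (i, j-1),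
--         ]
--         if 0 <= next_i < len(map) and 0 <= next_j < len(map[next_i])
--           and map[next_i][next_j] == value
--     ]
-- ===== SOURCE B (Python) =====
-- def traverse_trails(map, i, j):
--     # Iterative DFS with an explicit stack; pushes candidate neighbours in
--     # reversed order so they pop in A's up/right/down/left order.
--     result = []
--     stack = [(i, j)]
--     while stack:
--         ci, cj = stack.pop()
--         current = map[ci][cj]
--         if current == "9":
--             result.append((ci, cj))
--             continue
--         nxt = str(int(current) + 1)
--         for ni, nj in ((ci, cj - 1), (ci + 1, cj), (ci, cj + 1), (ci - 1, cj)):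
--             if 0 <= ni < len(map) and 0 <= nj < len(map[ni]) and map[ni][nj] == nxt:
--                 stack.append((ni, nj))
--     return result
-- ===== Notes on version B (the rewrite author's own statement) =====
-- stated objective: alternative
-- what changed: The recursive DFS with reduce-concatenation is replaced by an iterative DFS over an explicit stack that pushes candidate neighbours in reversed order and accumulates endpoints in one result list.
import Mathlib
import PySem

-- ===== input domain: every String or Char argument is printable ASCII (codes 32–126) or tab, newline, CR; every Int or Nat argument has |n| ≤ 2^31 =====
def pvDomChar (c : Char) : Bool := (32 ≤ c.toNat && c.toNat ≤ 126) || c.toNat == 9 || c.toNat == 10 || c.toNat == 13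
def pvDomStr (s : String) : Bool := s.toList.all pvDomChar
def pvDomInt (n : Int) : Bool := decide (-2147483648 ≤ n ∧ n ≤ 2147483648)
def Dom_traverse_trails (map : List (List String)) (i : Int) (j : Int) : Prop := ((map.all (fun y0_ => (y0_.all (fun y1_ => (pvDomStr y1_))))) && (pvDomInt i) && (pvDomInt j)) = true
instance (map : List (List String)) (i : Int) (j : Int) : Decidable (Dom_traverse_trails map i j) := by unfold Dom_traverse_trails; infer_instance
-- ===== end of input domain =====

-- B replaces A's recursive DFS (reduce of list concatenations) by an iterative DFS over an
-- explicit stack (objective: alternative decomposition, same asymptotic cost).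
-- Both ports carry a fuel argument as a pure totality guard (the Python recursion/loop
-- terminates because trail values strictly increase; the fuel map.flatten.length + 1 bounds the
-- real path depth); the proved equality holds for the ports as written, fuel included.

-- ===== PORT A =====
-- map[i][j] (Python indexing, negative indices wrap); none = IndexError
def pvCellAt (map : List (List String)) (i : Int) (j : Int) : Option String :=
  (PySem.List.pyGet? map i).bind (fun row => PySem.List.pyGet? row j)

-- the condition of the comprehension in `neighbours`:
-- 0 <= next_i < len(map) and 0 <= next_j < len(map[next_i]) and map[next_i][next_j] == value
def pvCellOK (map : List (List String)) (value : String) (p : Int × Int) : Bool :=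
  decide (0 ≤ p.1) && decide (p.1 < (map.length : Int)) &&
    (match PySem.List.pyGet? map p.1 with
     | none => false
     | some row =>
         decide (0 ≤ p.2) && decide (p.2 < (row.length : Int)) &&
           (PySem.List.pyGet? row p.2 == some value))

-- helper `neighbours(map, value, i, j)` of A
def pvNeighbours (map : List (List String)) (value : String) (i : Int) (j : Int) :
    List (Int × Int) :=
  ([(i - 1, j), (i, j + 1), (i + 1, j), (i, j - 1)]).filter (pvCellOK map value)

-- A's recursion, with a fuel totality guard (fuel 0 is never reached for the fuel used below)
def pvGoA (map : List (List String)) : Nat → Int → Int → List (Int × Int)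
  | 0, _, _ => []
  | n + 1, i, j =>
    match pvCellAt map i j with
    | none => []          -- Python: IndexError (excluded by Pre_)
    | some current =>
      if current == "9" then [(i, j)]
      else
        match PySem.Int.ofStr? current with
        | none => []      -- Python: ValueError from int(current) (excluded by Pre_)
        | some v =>
          -- reduce(lambda l1, l2: l1 + l2, [traverse_trails(...) for ... in neighbours(...)], [])
          ((pvNeighbours map (PySem.Int.toStr (v + 1)) i j).map
              (fun p => pvGoA map n p.1 p.2)).foldl (· ++ ·) []

def traverse_trails (map : List (List String)) (i : Int) (j : Int) : List (Int × Int) :=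
  pvGoA map (map.flatten.length + 1) i j

-- ===== PORT B =====
-- Source B's inner for-loop: push each candidate (given in reversed order) that passes the check
-- onto a top-at-end stack.  The port keeps the stack top-at-head, so the fold below prepends;
-- its net effect (proved in pvPush_eq) is prepending the up/right/down/left candidates in order.
-- The Nat in each entry is the fuel totality guard.
def pvPush (map : List (List String)) (value : String) (i j : Int) (n : Nat)
    (stack : List (Int × Int × Nat)) : List (Int × Int × Nat) :=
  (([(i, j - 1), (i + 1, j), (i, j + 1), (i - 1, j)]).filter (pvCellOK map value)).foldl
    (fun st p => (p.1, p.2, n) :: st) stack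

theorem pvFoldl_cons_eq {α β : Type} (g : α → β) :
    ∀ (l : List α) (st : List β),
      l.foldl (fun st p => g p :: st) st = (l.map g).reverse ++ st := by
  intro l
  induction l with
  | nil => intro st; simp
  | cons a t ih => intro st; simp [List.foldl_cons, ih]

theorem pvPush_eq (map : List (List String)) (value : String) (i j : Int) (n : Nat)
    (stack : List (Int × Int × Nat)) :
    pvPush map value i j n stack =
      (pvNeighbours map value i j).map (fun p => (p.1, p.2, n)) ++ stack := by
  unfold pvPush pvNeighbours
  rw [pvFoldl_cons_eq, ← List.map_reverse, ← List.filter_reverse]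
  rfl

-- stack measure for the while-loop's termination
def pvMeasure (stack : List (Int × Int × Nat)) : Nat :=
  (stack.map (fun e => 5 ^ e.2.2)).sum

theorem pvMeasure_push_lt (map : List (List String)) (value : String) (a b i j : Int)
    (n : Nat) (rest : List (Int × Int × Nat)) :
    pvMeasure (pvPush map value i j n rest) < pvMeasure ((a, b, n + 1) :: rest) := by
  rw [pvPush_eq]
  unfold pvMeasure
  rw [List.map_append, List.sum_append, List.map_cons, List.sum_cons]
  have h1 : ∀ (l : List (Int × Int)),
      ((l.map (fun p => (p.1, p.2, n))).map (fun e => 5 ^ e.2.2)).sum = l.length * 5 ^ n := by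
    intro l; induction l with
    | nil => simp
    | cons x t ih =>
      simp only [List.map_cons, List.sum_cons, List.length_cons, ih, Nat.succ_mul]
      omega
  rw [h1]
  have h2 : (pvNeighbours map value i j).length ≤ 4 := List.length_filter_le _ _
  have h3 : (pvNeighbours map value i j).length * 5 ^ n ≤ 4 * 5 ^ n :=
    Nat.mul_le_mul_right _ h2
  have h4 : 4 * 5 ^ n < 5 ^ (n + 1) := by
    have h : (5:Nat) ^ (n+1) = 5 * 5 ^ n := pow_succ' 5 n
    have hp : 0 < 5 ^ n := Nat.pow_pos (by norm_num)
    omega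
  exact Nat.add_lt_add_right (lt_of_le_of_lt h3 h4) _

-- Source B's while-loop over the explicit stack
def pvLoopB (map : List (List String)) :
    List (Int × Int × Nat) → List (Int × Int) → List (Int × Int)
  | [], result => result
  | (i, j, f) :: rest, result =>
    match f with
    | 0 => pvLoopB map rest result      -- fuel guard, never reached for the fuel used below
    | n + 1 =>
      match pvCellAt map i j with
      | none => pvLoopB map rest result -- Python: IndexError (excluded by Pre_)
      | some current =>
        if current == "9" then pvLoopB map rest (result ++ [(i, j)])
        else
          match PySem.Int.ofStr? current with
          | none => pvLoopB map rest result  -- Python: ValueError (excluded by Pre_)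
          | some v =>
            pvLoopB map (pvPush map (PySem.Int.toStr (v + 1)) i j n rest) result
  termination_by stack _ => pvMeasure stack
  decreasing_by
  all_goals first
    | exact pvMeasure_push_lt ..
    | (simp [pvMeasure]; try positivity)

def traverse_trails_alt (map : List (List String)) (i : Int) (j : Int) : List (Int × Int) :=
  pvLoopB map [(i, j, map.flatten.length + 1)] []

-- ===== PRECONDITION & SPEC =====
-- Pre_ excludes exactly the inputs where the Python A raises: an initial index outside the map
-- (IndexError) or an initial cell that is neither "9" nor int()-parsable (ValueError); every
-- other reachable cell equals str(v+1) for some int v and always parses.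
def Pre_traverse_trails (map : List (List String)) (i : Int) (j : Int) : Prop :=
  (match pvCellAt map i j with
   | none => false
   | some s => (s == "9") || (PySem.Int.ofStr? s).isSome) = true

instance (map : List (List String)) (i : Int) (j : Int) :
    Decidable (Pre_traverse_trails map i j) := by unfold Pre_traverse_trails; infer_instance

def pvWitness_traverse_trails : List (List String) × Int × Int :=
  ([["0", "1"], ["3", "2"]], 0, 0)

def Spec_traverse_trails (map : List (List String)) (i : Int) (j : Int)
    (out : List (Int × Int)) : Prop := out = traverse_trails_alt map i j
instance (map : List (List String)) (i : Int) (j : Int) (out : List (Int × Int)) :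
    Decidable (Spec_traverse_trails map i j out) := by unfold Spec_traverse_trails; infer_instance

-- ===== CLAIM (what is proved, stated in full; the proofs are below) =====
def Claim_equal_traverse_trails : Prop := ∀ (map : List (List String)) (i : Int) (j : Int), Dom_traverse_trails map i j → Pre_traverse_trails map i j → Spec_traverse_trails map i j (traverse_trails map i j)

-- ===== LEMMAS AND PROOFS =====

-- loop invariant: the stack loop appends, to the accumulated result, the concatenation of A's
-- recursion over the stack entries in order
theorem pvLoopB_eq (map : List (List String)) :
    ∀ (stack : List (Int × Int × Nat)) (result : List (Int × Int)),
      pvLoopB map stack result =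
        result ++ stack.flatMap (fun e => pvGoA map e.2.2 e.1 e.2.1) := by
  intro stack result
  fun_induction pvLoopB map stack result with
  | case1 res => simp
  | case2 i j rest res ih => simp [ih, pvGoA]
  | case3 i j st res n hcell ih => simp [ih, pvGoA, hcell]
  | case4 i j st res n cur hcell h9 ih => simp [ih, pvGoA, hcell, h9]
  | case5 i j st res n cur hcell h9 hparse ih => simp [ih, pvGoA, hcell, h9, hparse]
  | case6 i j st res n cur hcell h9 v hparse ih =>
    rw [ih, pvPush_eq, List.flatMap_append]
    simp [pvGoA, hcell, h9, hparse, PySem.List.foldl_append_eq_flatten, List.flatMap,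
      Function.comp_def]

-- ===== VERDICT (by name: the statement is the Claim_ definition above) =====
theorem traverse_trails_spec : Claim_equal_traverse_trails := by
  intro map i j _ _
  unfold Spec_traverse_trails traverse_trails traverse_trails_alt
  rw [pvLoopB_eq]
  simp
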